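-- pv_equiv track=rewrite | github.com/Hata41/latex | maze/scripts/maze_solver_beamer.py | _split_unique_segments
-- ===== SOURCE A (Python) =====
-- def _split_unique_segments(path, occupied):
--     segs, cur = [], []
--     for cell in path:
--         if cell in occupied:
--             if cur:
--                 segs.append(cur)
--                 cur = []
--         else:
--             if cur and (abs(cur[-1][0] - cell[0]) + abs(cur[-1][1] - cell[1]) != 1):
--                 segs.append(cur)
--                 cur = [cell]
--             else:
--                 cur.append(cell)
--     if cur:
--         segs.append(cur)
--     return segs
-- ===== SOURCE B (Python) =====
-- def _split_unique_segments(path, occupied):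
--     # Stage 1: partition path into maximal runs of equal occupancy.
--     runs = []
--     i, n = 0, len(path)
--     while i < n:
--         k = path[i] in occupied
--         j = i + 1
--         while j < n and (path[j] in occupied) == k:
--             j += 1
--         runs.append((k, path[i:j]))
--         i = j
--     # Stage 2: drop occupied runs; split each free run at Manhattan breaks.
--     segs = []
--     for k, run in runs:
--         if k:
--             continue
--         cur = [run[0]]
--         for cell in run[1:]:
--             if abs(cur[-1][0] - cell[0]) + abs(cur[-1][1] - cell[1]) == 1:
--                 cur.append(cell)
--             else:
--                 segs.append(cur)
--                 cur = [cell]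
--         segs.append(cur)
--     return segs
-- ===== Notes on version B (the rewrite author's own statement) =====
-- stated objective: alternative
-- what changed: Replaces A's single-pass state machine by a two-stage pipeline: first partition the path into maximal runs of equal occupancy, then drop occupied runs and split each free run at Manhattan-distance breaks.
import Mathlib
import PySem

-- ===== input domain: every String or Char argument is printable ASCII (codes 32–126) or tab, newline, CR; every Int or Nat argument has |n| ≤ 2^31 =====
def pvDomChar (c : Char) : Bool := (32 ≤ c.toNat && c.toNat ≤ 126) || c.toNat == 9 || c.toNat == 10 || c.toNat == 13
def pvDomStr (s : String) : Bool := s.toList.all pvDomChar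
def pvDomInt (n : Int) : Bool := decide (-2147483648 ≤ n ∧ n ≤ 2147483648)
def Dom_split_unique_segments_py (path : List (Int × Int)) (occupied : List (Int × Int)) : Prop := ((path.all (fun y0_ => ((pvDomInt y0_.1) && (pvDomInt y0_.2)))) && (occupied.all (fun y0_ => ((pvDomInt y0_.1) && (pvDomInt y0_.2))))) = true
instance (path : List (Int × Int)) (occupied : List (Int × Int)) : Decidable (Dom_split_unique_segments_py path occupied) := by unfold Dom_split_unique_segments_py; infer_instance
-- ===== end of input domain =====

-- B replaces A's inline state machine by two stages (occupancy runs, then adjacency splits); objective: alternative decomposition, same cost.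

-- ===== PORT A =====
-- the for-loop of A, state = (segs, cur); trailing `if cur` flush in the base case
def pvALoop (occupied : List (Int × Int)) : List (Int × Int) → List (List (Int × Int)) → List (Int × Int) → List (List (Int × Int))
  | [], segs, cur => if cur = [] then segs else segs ++ [cur]
  | c :: t, segs, cur =>
    if c ∈ occupied then
      if cur = [] then pvALoop occupied t segs cur
      else pvALoop occupied t (segs ++ [cur]) []
    else
      -- `cur and manhattan(cur[-1], cell) != 1` : cur nonempty ↔ getLast? = some
      match cur.getLast? with
      | some p =>
        if (p.1 - c.1).natAbs + (p.2 - c.2).natAbs ≠ 1 then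
          pvALoop occupied t (segs ++ [cur]) [c]
        else pvALoop occupied t segs (cur ++ [c])
      | none => pvALoop occupied t segs (cur ++ [c])

def split_unique_segments_py (path : List (Int × Int)) (occupied : List (Int × Int)) : List (List (Int × Int)) :=
  pvALoop occupied path [] []

-- ===== PORT B =====
-- stage 1: maximal runs of equal occupancy (inner while = takeWhile/dropWhile)
def pvRuns (occupied : List (Int × Int)) : List (Int × Int) → List (Bool × List (Int × Int))
  | [] => []
  | c :: t =>
    (decide (c ∈ occupied), c :: t.takeWhile (fun x => decide (x ∈ occupied) == decide (c ∈ occupied)))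
      :: pvRuns occupied (t.dropWhile (fun x => decide (x ∈ occupied) == decide (c ∈ occupied)))
  termination_by l => l.length
  decreasing_by simpa using Nat.lt_succ_of_le (List.length_dropWhile_le _ _)

-- stage 2 inner loop: split one free run at Manhattan breaks (cur is always nonempty when called)
def pvSub : List (Int × Int) → List (Int × Int) → List (List (Int × Int))
  | cur, [] => [cur]
  | cur, c :: t =>
    match cur.getLast? with
    | some p =>
      if (p.1 - c.1).natAbs + (p.2 - c.2).natAbs = 1 then pvSub (cur ++ [c]) t
      else cur :: pvSub [c] t
    | none => pvSub (cur ++ [c]) t  -- unreachable: pvSub is only called with nonempty cur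

def split_unique_segments_py_alt (path : List (Int × Int)) (occupied : List (Int × Int)) : List (List (Int × Int)) :=
  (pvRuns occupied path).flatMap (fun g =>
    if g.1 then [] else match g.2 with | [] => [] | h :: t => pvSub [h] t)

-- ===== PRECONDITION & SPEC =====
def Spec_split_unique_segments_py (path : List (Int × Int)) (occupied : List (Int × Int)) (out : List (List (Int × Int))) : Prop := out = split_unique_segments_py_alt path occupied
instance (path : List (Int × Int)) (occupied : List (Int × Int)) (out : List (List (Int × Int))) : Decidable (Spec_split_unique_segments_py path occupied out) := by unfold Spec_split_unique_segments_py; infer_instance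

-- ===== CLAIM (what is proved, stated in full; the proofs are below) =====
def Claim_equal_split_unique_segments_py : Prop := ∀ (path : List (Int × Int)) (occupied : List (Int × Int)), Dom_split_unique_segments_py path occupied → Spec_split_unique_segments_py path occupied (split_unique_segments_py path occupied)

-- ===== LEMMAS AND PROOFS =====

-- the accumulator of A's loop is only ever appended to on the left
theorem pvALoop_append (occupied : List (Int × Int)) :
    ∀ (t : List (Int × Int)) (s1 s2 : List (List (Int × Int))) (cur : List (Int × Int)),
      pvALoop occupied t (s1 ++ s2) cur = s1 ++ pvALoop occupied t s2 cur := by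
  intro t
  induction t with
  | nil => intro s1 s2 cur; by_cases h : cur = [] <;> simp [pvALoop, h]
  | cons c t ih =>
    intro s1 s2 cur
    by_cases hc : c ∈ occupied
    · by_cases h : cur = [] <;>
        simp [pvALoop, hc, h, List.append_assoc, ih]
    · cases hl : cur.getLast? with
      | none => simp [pvALoop, hc, hl, ih]
      | some p =>
        by_cases hm : (p.1 - c.1).natAbs + (p.2 - c.2).natAbs ≠ 1 <;>
          simp [pvALoop, hc, hl, hm, List.append_assoc, ih]

-- an occupied head cell contributes nothing to B's result
theorem pvAlt_occ_cons (occupied : List (Int × Int)) (c : Int × Int) (t : List (Int × Int))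
    (hc : c ∈ occupied) :
    split_unique_segments_py_alt (c :: t) occupied = split_unique_segments_py_alt t occupied := by
  cases t with
  | nil => simp [split_unique_segments_py_alt, pvRuns, hc]
  | cons d t' =>
    by_cases hd : d ∈ occupied
    · simp [split_unique_segments_py_alt, pvRuns, hc, hd]
    · simp [split_unique_segments_py_alt, pvRuns, hc, hd]

-- main invariant: A's loop from state ([], cur) computes B's two-stage result
theorem pvMain (occupied : List (Int × Int)) :
    ∀ (path : List (Int × Int)),
      (pvALoop occupied path [] [] = split_unique_segments_py_alt path occupied) ∧
      (∀ cur : List (Int × Int), cur ≠ [] →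
        pvALoop occupied path [] cur =
          pvSub cur (path.takeWhile (fun x => decide (x ∈ occupied) == false)) ++
            split_unique_segments_py_alt (path.dropWhile (fun x => decide (x ∈ occupied) == false)) occupied) := by
  intro path
  induction path with
  | nil =>
    constructor
    · simp [pvALoop, split_unique_segments_py_alt, pvRuns]
    · intro cur hcur; simp [pvALoop, hcur, pvSub, split_unique_segments_py_alt, pvRuns]
  | cons c t ih =>
    by_cases hc : c ∈ occupied
    · constructor
      · simp only [pvALoop, if_pos hc]
        rw [if_pos trivial, ih.1, pvAlt_occ_cons occupied c t hc]
      · intro cur hcur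
        simp only [pvALoop, if_pos hc, if_neg hcur, List.nil_append]
        have h1 : pvALoop occupied t ([cur] ++ []) [] = [cur] ++ pvALoop occupied t [] [] :=
          pvALoop_append occupied t [cur] [] []
        simp only [List.append_nil] at h1
        rw [h1, ih.1, ← pvAlt_occ_cons occupied c t hc]
        simp [List.takeWhile, List.dropWhile, hc, pvSub]
    · have hpart1 : pvALoop occupied (c :: t) [] [] = split_unique_segments_py_alt (c :: t) occupied := by
        simp only [pvALoop, if_neg hc, List.getLast?_nil, List.nil_append]
        rw [(ih.2 [c] (by simp))]
        simp [split_unique_segments_py_alt, pvRuns, hc]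
      constructor
      · exact hpart1
      · intro cur hcur
        obtain ⟨p, hl⟩ : ∃ p, cur.getLast? = some p := by
          cases hcl : cur.getLast? with
          | none => exact absurd (List.getLast?_eq_none_iff.mp hcl) hcur
          | some p => exact ⟨p, rfl⟩
        by_cases hm : (p.1 - c.1).natAbs + (p.2 - c.2).natAbs = 1
        · simp only [pvALoop, if_neg hc, hl]
          rw [if_neg (by omega)]
          rw [ih.2 (cur ++ [c]) (by simp)]
          simp [List.takeWhile, List.dropWhile, hc, pvSub, hl, hm]
        · simp only [pvALoop, if_neg hc, hl, if_pos hm, List.nil_append]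
          have h1 : pvALoop occupied t ([cur] ++ []) [c] = [cur] ++ pvALoop occupied t [] [c] :=
            pvALoop_append occupied t [cur] [] [c]
          simp only [List.append_nil] at h1
          rw [h1, ih.2 [c] (by simp)]
          simp [List.takeWhile, List.dropWhile, hc, pvSub, hl, hm]

-- ===== VERDICT (by name: the statement is the Claim_ definition above) =====
theorem split_unique_segments_py_spec : Claim_equal_split_unique_segments_py := by
  intro path occupied _
  unfold Spec_split_unique_segments_py split_unique_segments_py
  exact (pvMain occupied path).1
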